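-- pv_equiv track=rewrite | github.com/NikoKoskinen/PythonYmparisto | barcode.py | calculateCode128BCheksum
-- ===== SOURCE A (Python) =====
-- def barCodeValue(character: str) -> int:
--     """Calculates a value of character used in Code128B barcode generation
--
--     Args:
--         character (str): a single character to convert
--
--     Returns:
--         int: Code128B value for calcultaing the checksum
--     """
--     asciiValue = ord(character)
--     code128BValue = asciiValue - 32
--     return code128BValue
--
-- def calculateCode128BCheksum(text: str) -> int:
--     """Calculates a checksum for a given string
--
--     Args:
--         text (str): text string to use in a barcode
--
--     Returns:
--         int: Modulo 103 checksum of weighted values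
--     """
--     text = text.strip()
--     numberOfLetters = len(text)
--     weightedSum = 0
--     for number in range(numberOfLetters):
--         letter = text[number]
--         code128BValue = barCodeValue(letter)
--         weightedValue = code128BValue * (number + 1)
--         weightedSum = weightedSum + weightedValue
--     weightedSum = weightedSum + 104
--     code128BChecksum = weightedSum % 103
--     return code128BChecksum
-- ===== SOURCE B (Python) =====
-- def calculateCode128BCheksum(text: str) -> int:
--     """Modulo-103 Code128B checksum via a reverse-order double accumulation
--     (prefix-sum trick) instead of per-index multiplication."""
--     text = text.strip()
--     running = 0
--     total = 0
--     for c in reversed(text):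
--         running += ord(c) - 32
--         total += running
--     return (total + 104) % 103
-- ===== Notes on version B (the rewrite author's own statement) =====
-- stated objective: alternative
-- what changed: Replaces the index-multiply loop (value * (index+1)) by a reverse-order scan keeping two accumulators (a running suffix sum and its total), which yields the same weighted sum without any index arithmetic.
import Mathlib
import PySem

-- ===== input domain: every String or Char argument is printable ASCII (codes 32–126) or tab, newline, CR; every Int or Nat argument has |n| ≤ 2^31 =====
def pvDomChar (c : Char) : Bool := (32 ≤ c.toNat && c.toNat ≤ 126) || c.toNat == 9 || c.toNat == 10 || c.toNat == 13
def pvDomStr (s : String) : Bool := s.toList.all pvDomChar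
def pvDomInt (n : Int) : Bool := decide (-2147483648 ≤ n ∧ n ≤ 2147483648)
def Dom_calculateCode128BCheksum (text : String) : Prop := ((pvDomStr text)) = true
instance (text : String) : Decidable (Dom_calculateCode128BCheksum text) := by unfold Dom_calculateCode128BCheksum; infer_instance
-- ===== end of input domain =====

-- B replaces A's index-multiply loop by a reverse-order double accumulation; alternative decomposition, same cost.

-- ===== PORT A =====
def barCodeValue (character : Char) : Int :=
  (character.toNat : Int) - 32

def calculateCode128BCheksum (text : String) : Int :=
  let t := PySem.Str.strip text
  let numberOfLetters := PySem.Str.len t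
  let weightedSum :=
    (PySem.List.pyRange 0 numberOfLetters 1).foldl
      (fun weightedSum number =>
        let letter := PySem.List.pyGetD t.toList number ' '
        let code128BValue := barCodeValue letter
        let weightedValue := code128BValue * (number + 1)
        weightedSum + weightedValue) 0
  PySem.Int.mod (weightedSum + 104) 103

-- ===== PORT B =====
def calculateCode128BCheksum_alt (text : String) : Int :=
  let cs := (PySem.Str.strip text).toList
  let p := cs.reverse.foldl
    (fun (p : Int × Int) c =>
      let running := p.1 + ((c.toNat : Int) - 32)
      (running, p.2 + running)) ((0 : Int), (0 : Int))
  PySem.Int.mod (p.2 + 104) 103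

-- ===== PRECONDITION & SPEC =====
def Spec_calculateCode128BCheksum (text : String) (out : Int) : Prop := out = calculateCode128BCheksum_alt text
instance (text : String) (out : Int) : Decidable (Spec_calculateCode128BCheksum text out) := by unfold Spec_calculateCode128BCheksum; infer_instance

-- ===== CLAIM (what is proved, stated in full; the proofs are below) =====
def Claim_equal_calculateCode128BCheksum : Prop := ∀ (text : String), Dom_calculateCode128BCheksum text → Spec_calculateCode128BCheksum text (calculateCode128BCheksum text)

-- ===== LEMMAS AND PROOFS =====

-- weighted sum of character values, first character carrying weight w
def pvWsum : List Char → Int → Int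
  | [], _ => 0
  | c :: t, w => ((c.toNat : Int) - 32) * w + pvWsum t (w + 1)

-- plain sum of character values
def pvSumv : List Char → Int
  | [] => 0
  | c :: t => ((c.toNat : Int) - 32) + pvSumv t

theorem pvWsum_shift (cs : List Char) (w : Int) :
    pvWsum cs (w + 1) = pvWsum cs w + pvSumv cs := by
  induction cs generalizing w with
  | nil => simp [pvWsum, pvSumv]
  | cons c t ih => simp [pvWsum, pvSumv, ih (w + 1)]; ring

theorem pvEnumFold (cs : List Char) (s : Int) (acc : Int) :
    (PySem.List.enumerate cs s).foldl
      (fun acc p => acc + ((p.2.toNat : Int) - 32) * (p.1 + 1)) acc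
      = acc + pvWsum cs (s + 1) := by
  induction cs generalizing s acc with
  | nil => simp [PySem.List.enumerate_nil, pvWsum]
  | cons c t ih =>
      rw [PySem.List.enumerate_cons, List.foldl_cons, ih]
      simp [pvWsum]; ring

theorem pvRevFold (cs : List Char) (r t : Int) :
    cs.reverse.foldl
      (fun (p : Int × Int) c =>
        let running := p.1 + ((c.toNat : Int) - 32)
        (running, p.2 + running)) (r, t)
      = (r + pvSumv cs, t + (cs.length : Int) * r + pvWsum cs 1) := by
  induction cs generalizing r t with
  | nil => simp [pvSumv, pvWsum]
  | cons c cs ih =>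
      rw [List.reverse_cons, List.foldl_append, ih]
      simp only [List.foldl_cons, List.foldl_nil, pvSumv, pvWsum, List.length_cons]
      have h1 : pvWsum cs (1 + 1) = pvWsum cs 1 + pvSumv cs := pvWsum_shift cs 1
      rw [Prod.mk.injEq]
      refine ⟨by ring, ?_⟩
      rw [h1]; push_cast; ring

theorem pvAFold (cs : List Char) :
    (PySem.List.pyRange 0 (cs.length : Int) 1).foldl
      (fun acc number => acc + ((PySem.List.pyGetD cs number ' ').toNat - 32 : Int) * (number + 1)) 0
      = pvWsum cs 1 := by
  have hmap := PySem.List.enumerate_eq_map_pyRange cs ' '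
  have : (PySem.List.enumerate cs 0).foldl
      (fun acc p => acc + ((p.2.toNat : Int) - 32) * (p.1 + 1)) 0
      = (PySem.List.pyRange 0 (cs.length : Int) 1).foldl
      (fun acc number => acc + (((PySem.List.pyGetD cs number ' ').toNat : Int) - 32) * (number + 1)) 0 := by
    rw [hmap]
    simp [List.foldl_map, PySem.List.len_eq]
  rw [← this, pvEnumFold]
  simp

theorem calculateCode128BCheksum_spec : Claim_equal_calculateCode128BCheksum := by
  intro text _
  show calculateCode128BCheksum text = calculateCode128BCheksum_alt text
  unfold calculateCode128BCheksum calculateCode128BCheksum_alt barCodeValue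
  simp only [PySem.Str.len_eq]
  rw [pvAFold ((PySem.Str.strip text).toList)]
  rw [pvRevFold ((PySem.Str.strip text).toList) 0 0]
  have h : ((0 : Int) + pvSumv (PySem.Str.strip text).toList,
      (0 : Int) + ((PySem.Str.strip text).toList.length : Int) * 0 + pvWsum (PySem.Str.strip text).toList 1).2 + 104
      = pvWsum (PySem.Str.strip text).toList 1 + 104 := by
    show (0 : Int) + ((PySem.Str.strip text).toList.length : Int) * 0 + pvWsum (PySem.Str.strip text).toList 1 + 104 = _
    ring
  rw [h]
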